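-- pv_equiv track=rewrite | github.com/voschezang/mash | src/mash/util.py | find_prefix_matches
-- ===== SOURCE A (Python) =====
-- from typing import Any, Callable, Dict, Generator, Iterable, List, MappingView, Sequence, Tuple, TypeVar, Union
--
-- T = TypeVar('T')
--
-- def take(values: Iterable[T], n: int) -> List[T]:
--     """Return the first n items
--     https://hackage.haskell.org/package/base-4.17.0.0/docs/Prelude.html#v:take
--     """
--     return (v for i, v in enumerate(values) if i < n)
--
-- def find_prefix_matches(element: str, elements: MappingView[str]):
--     """Yields all elements that are equal to a prefix of `element`.
--     Elements with better matches are chosen first.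
--
--     Raise a ValueError when no matches are found.
--     """
--     # TODO rm this cache and the corresponding ValueError
--     iter = list_prefix_matches(element, elements)
--     i = -1
--     for i, match in enumerate(iter):
--         yield match
--
--     if i == -1:
--         preview = ', '.join(take(elements, 3))
--         raise ValueError(
--             f'{element} is not a prefix of any of the given items [{preview}, ..]')
--
-- def list_prefix_matches(element: str, elements: List[str]):
--     """Yields all elements that are equal to a prefix of `element`.
--     Elements with better matches are chosen first.
--     """
--     prev_matches = set()
--     for i in range(max(1, len(element)), 0, -1):
--         prefix = element[:i]
--         for other in elements:
--             if other in prev_matches: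
--                 continue
--
--             if other.startswith(prefix):
--                 prev_matches |= {other}
--                 yield other
-- ===== SOURCE B (Python) =====
-- def find_prefix_matches(element: str, elements):
--     """Yields all elements sharing a prefix with `element`, longest common
--     prefix first (stable within equal lengths, duplicates yielded once).
--     Single pass computing the common-prefix length per element, then a
--     bucket (counting-sort) sweep from the longest prefix down.
--     Raises ValueError when no matches are found."""
--     L = max(1, len(element))
--     buckets = [[] for _ in range(L + 1)]
--     seen = set()
--     for other in elements:
--         if other in seen:
--             continue
--         seen.add(other)
--         p = 0
--         for a, b in zip(element, other):
--             if a == b: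
--                 p += 1
--             else:
--                 break
--         if element == '':
--             buckets[1].append(other)
--         elif p:
--             buckets[p].append(other)
--     matched = False
--     for i in range(L, 0, -1):
--         for other in buckets[i]:
--             matched = True
--             yield other
--     if not matched:
--         preview = ', '.join(list(elements)[:3])
--         raise ValueError(
--             f'{element} is not a prefix of any of the given items [{preview}, ..]')
-- ===== Notes on version B (the rewrite author's own statement) =====
-- stated objective: faster
-- what changed: Replaces the L nested scans of elements (one per prefix length, each doing a startswith of that length) by a single pass computing each element's common-prefix length once, bucketing by that length, and emitting buckets from longest to shortest (a counting-sort).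
import Mathlib
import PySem

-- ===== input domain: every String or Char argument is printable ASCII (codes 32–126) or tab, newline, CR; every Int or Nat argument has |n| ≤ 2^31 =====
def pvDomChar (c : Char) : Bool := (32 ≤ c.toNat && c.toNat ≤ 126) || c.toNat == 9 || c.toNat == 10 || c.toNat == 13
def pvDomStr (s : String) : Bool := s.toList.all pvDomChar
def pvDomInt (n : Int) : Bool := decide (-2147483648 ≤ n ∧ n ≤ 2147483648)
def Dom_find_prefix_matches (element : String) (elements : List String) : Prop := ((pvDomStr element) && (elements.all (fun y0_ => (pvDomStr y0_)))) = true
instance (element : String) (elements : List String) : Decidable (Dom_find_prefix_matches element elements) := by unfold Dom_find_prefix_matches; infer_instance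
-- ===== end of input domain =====

-- B replaces A's repeated scans of `elements` (one per prefix length, each redoing a startswith)
-- by one pass computing each element's common-prefix length and a bucket sweep (counting sort): faster.
-- A is a Python generator that raises ValueError when nothing matches; the ports return the yielded
-- list, and Pre_ excludes the no-match inputs where A raises.

-- ===== PORT A =====
-- A: for i in range(max(1,len(element)), 0, -1): for other in elements:
--      skip if already yielded; yield if other.startswith(element[:i]).
def find_prefix_matches (element : String) (elements : List String) : List String :=
  let e := element.toList
  ((PySem.List.pyRange (max 1 (PySem.Str.len element)) 0 (-1)).foldl
    (fun (st : PySem.Set String × List String) i =>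
      let pfx := PySem.List.slice e none (some i)
      elements.foldl
        (fun (st : PySem.Set String × List String) other =>
          if PySem.Set.contains st.1 other then st
          else if PySem.Chars.startswith other.toList pfx then
            (PySem.Set.add st.1 other, st.2 ++ [other])
          else st) st)
    (PySem.Set.empty, [])).2

-- ===== PORT B =====
-- Source B's inner zip loop: common-prefix length, breaking at the first mismatch
def commonLen : List Char → List Char → Nat
  | a :: as, b :: bs => if a == b then commonLen as bs + 1 else 0
  | _, _ => 0

def find_prefix_matches_alt (element : String) (elements : List String) : List String :=
  let e := element.toList
  let L : Nat := max 1 e.length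
  let st := elements.foldl
    (fun (st : PySem.Set String × List (List String)) other =>
      if PySem.Set.contains st.1 other then st
      else
        let seen := PySem.Set.add st.1 other
        let p := commonLen e other.toList
        if e.isEmpty then (seen, st.2.set 1 (st.2.getD 1 [] ++ [other]))
        else if p ≠ 0 then (seen, st.2.set p (st.2.getD p [] ++ [other]))
        else (seen, st.2))
    (PySem.Set.empty, List.replicate (L + 1) [])
  (PySem.List.pyRange (L : Int) 0 (-1)).foldl (fun acc i => acc ++ st.2.getD i.toNat []) []

-- ===== PRECONDITION & SPEC =====
-- Pre_ excludes exactly the inputs on which A (a generator) yields nothing and raises ValueError: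
-- no element of `elements` starts with element[:1].
def Pre_find_prefix_matches (element : String) (elements : List String) : Prop :=
  ∃ o ∈ elements, element.toList.take 1 <+: o.toList
instance (element : String) (elements : List String) : Decidable (Pre_find_prefix_matches element elements) := by unfold Pre_find_prefix_matches; infer_instance
def pvWitness_find_prefix_matches : String × List String := ("ab", ["abc", "x"])

def Spec_find_prefix_matches (element : String) (elements : List String) (out : List String) : Prop := out = find_prefix_matches_alt element elements
instance (element : String) (elements : List String) (out : List String) : Decidable (Spec_find_prefix_matches element elements out) := by unfold Spec_find_prefix_matches; infer_instance

-- ===== CLAIM (what is proved, stated in full; the proofs are below) =====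
def Claim_equal_find_prefix_matches : Prop := ∀ (element : String) (elements : List String), Dom_find_prefix_matches element elements → Pre_find_prefix_matches element elements → Spec_find_prefix_matches element elements (find_prefix_matches element elements)

-- ===== LEMMAS AND PROOFS =====

-- the elements of l not already in s, first occurrences, in order
def news (s : List String) : List String → List String
  | [] => []
  | x :: l => if x ∈ s then news s l else x :: news (s ++ [x]) l

-- the bucket index ('key') both programs give an element: the common-prefix length (1 for element = '')
def pkey (e : List Char) (o : String) : Nat :=
  if e.isEmpty then 1 else commonLen e o.toList

theorem set_contains_eq (s : PySem.Set String) (x : String) :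
    PySem.Set.contains s x = decide (x ∈ s) := by simp [pysem]

theorem set_add_eq (s : PySem.Set String) (x : String) :
    PySem.Set.add s x = if x ∈ s then s else s ++ [x] := by
  show (if PySem.Set.contains s x then s else s ++ [x]) = _
  simp [pysem]

theorem commonLen_le (e o : List Char) : commonLen e o ≤ e.length := by
  induction e generalizing o with
  | nil => simp [commonLen]
  | cons a as ih =>
    cases o with
    | nil => simp [commonLen]
    | cons b bs =>
      simp only [commonLen]
      split
      · exact Nat.succ_le_succ (ih bs)
      · simp

theorem pkey_le (e : List Char) (o : String) : pkey e o ≤ max 1 e.length := by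
  unfold pkey
  split
  · omega
  · exact le_max_of_le_right (commonLen_le e o.toList)

theorem take_prefix_iff_commonLen (e o : List Char) (n : Nat) (hn : n ≤ e.length) :
    e.take n <+: o ↔ n ≤ commonLen e o := by
  induction e generalizing o n with
  | nil => simp_all
  | cons a as ih =>
    cases n with
    | zero => simp
    | succ m =>
      cases o with
      | nil =>
        simp only [commonLen, List.take_succ_cons]
        constructor
        · intro h; exact absurd h.length_le (by simp)
        · intro h; omega
      | cons b bs =>
        simp only [commonLen, List.take_succ_cons, List.cons_prefix_cons]
        by_cases hab : a = b
        · simp [hab, ih bs m (by simpa using hn)]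
        · constructor
          · rintro ⟨h, _⟩; exact absurd h hab
          · intro h
            rw [if_neg (by simpa using hab)] at h
            omega

-- the startswith test A performs at countdown value i is exactly 'i ≤ pkey'
-- the startswith test A performs at countdown value i is exactly 'i <= pkey'
theorem startswith_slice_eq_pkey (e : List Char) (o : String) (i : Int)
    (h1 : 1 ≤ i) (h2 : i ≤ ((max 1 e.length : Nat) : Int)) :
    PySem.Chars.startswith o.toList (PySem.List.slice e none (some i)) =
      decide (i.toNat ≤ pkey e o) := by
  rw [PySem.List.slice_to e (by omega)]
  rcases e with _ | ⟨a, as⟩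
  · have hi : i = 1 := by
      have : ((max 1 (List.length ([] : List Char)) : Nat) : Int) = 1 := by norm_num
      omega
    subst hi
    simp [pkey, PySem.Chars.startswith_iff]
  · have hmax : max 1 (a :: as).length = (a :: as).length := by
      simp only [List.length_cons]; omega
    rw [hmax] at h2
    have hn : i.toNat ≤ (a :: as).length := by omega
    have hiff := take_prefix_iff_commonLen (a :: as) o.toList i.toNat hn
    simp only [pkey, List.isEmpty_cons, Bool.false_eq_true, if_false]
    rcases Bool.eq_false_or_eq_true (PySem.Chars.startswith o.toList ((a :: as).take i.toNat)) with hb | hb <;>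
      rw [hb]
    · symm
      simp only [decide_eq_true_eq]
      exact hiff.mp ((PySem.Chars.startswith_iff _ _).mp hb)
    · symm
      simp only [decide_eq_false_iff_not]
      intro hle
      have := (PySem.Chars.startswith_iff o.toList ((a :: as).take i.toNat)).mpr (hiff.mpr hle)
      rw [hb] at this
      exact Bool.false_ne_true this

theorem mem_news_subset (s : List String) (l : List String) (x : String) :
    x ∈ news s l → x ∈ l := by
  induction l generalizing s with
  | nil => simp [news]
  | cons y l ih =>
    simp only [news]
    split
    · intro h; exact List.mem_cons_of_mem _ (ih s h)
    · intro h
      rcases List.mem_cons.mp h with rfl | h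
      · exact List.mem_cons_self
      · exact List.mem_cons_of_mem _ (ih _ h)

theorem not_mem_news_of_mem (s : List String) (l : List String) (x : String)
    (h : x ∈ s) : x ∉ news s l := by
  induction l generalizing s with
  | nil => simp [news]
  | cons y l ih =>
    simp only [news]
    split
    · exact ih s h
    · rename_i hy
      intro hmem
      rcases List.mem_cons.mp hmem with rfl | hmem
      · exact hy h
      · exact ih (s ++ [y]) (by simp [h]) hmem

theorem news_sub (l : List String) (s s' : List String)
    (hss : ∀ y ∈ s', y ∈ s) :
    news s l = (news s' l).filter (fun x => !(decide (x ∈ s))) := by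
  induction l generalizing s s' with
  | nil => simp [news]
  | cons x l ih =>
    simp only [news]
    by_cases hx' : x ∈ s'
    · have hx : x ∈ s := hss x hx'
      simp only [hx, hx', if_true]
      exact ih s s' hss
    · simp only [hx', if_false]
      by_cases hx : x ∈ s
      · simp only [hx, if_true, List.filter_cons, decide_true, Bool.not_true,
          Bool.false_eq_true, if_false]
        refine ih s (s' ++ [x]) ?_
        intro y hy
        rcases List.mem_append.mp hy with h | h
        · exact hss y h
        · simp only [List.mem_singleton] at h
          subst h; exact hx
      · simp only [hx, if_false, List.filter_cons, decide_false, Bool.not_false, if_true]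
        congr 1
        rw [ih (s ++ [x]) (s' ++ [x]) ?_]
        · refine List.filter_congr ?_
          intro y hy
          have hyx : y ≠ x := by
            rintro rfl
            exact not_mem_news_of_mem (s' ++ [y]) l y (by simp) hy
          simp [hyx]
        · intro y hy
          rcases List.mem_append.mp hy with h | h
          · exact List.mem_append.mpr (Or.inl (hss y h))
          · exact List.mem_append.mpr (Or.inr h)

theorem news_filter (s : List String) (l : List String) (P : String → Bool) :
    news s (l.filter P) = (news s l).filter P := by
  induction l generalizing s with
  | nil => simp [news]
  | cons x l ih =>
    simp only [List.filter_cons]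
    by_cases hP : P x = true
    · simp only [hP, if_true, news]
      by_cases hx : x ∈ s
      · simp [hx, ih s]
      · simp [hx, ih (s ++ [x]), hP]
    · simp only [hP, Bool.false_eq_true, if_false, news]
      by_cases hx : x ∈ s
      · simp [hx, ih s]
      · simp only [hx, if_false, List.filter_cons, hP, Bool.false_eq_true, if_false]
        rw [← ih (s ++ [x])]
        rw [news_sub (l.filter P) (s ++ [x]) [] (by simp),
            news_sub (l.filter P) s [] (by simp)]
        refine List.filter_congr ?_
        intro y hy
        have hyl : y ∈ l.filter P := mem_news_subset [] (l.filter P) y hy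
        have hyx : y ≠ x := by
          rintro rfl
          exact hP (List.of_mem_filter hyl)
        simp [hyx]

-- A's inner pass over `elements` with predicate P: the state stays diagonal and appends news s (l.filter P)
theorem innerA_eq (P : String → Bool) (l : List String) (s acc : List String) :
    l.foldl
      (fun (st : PySem.Set String × List String) other =>
        if PySem.Set.contains st.1 other then st
        else if P other then (PySem.Set.add st.1 other, st.2 ++ [other])
        else st) (s, acc)
    = (s ++ news s (l.filter P), acc ++ news s (l.filter P)) := by
  induction l generalizing s acc with
  | nil => simp [news]
  | cons x l ih =>
    rw [List.foldl_cons]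
    show List.foldl _
      (if PySem.Set.contains s x then (s, acc)
       else if P x then (PySem.Set.add s x, acc ++ [x]) else (s, acc)) l = _
    by_cases hx : x ∈ s
    · have hcc : PySem.Set.contains s x = true := by rw [set_contains_eq]; simp [hx]
      rw [if_pos hcc, ih s acc]
      have hns : news s ((x :: l).filter P) = news s (l.filter P) := by
        by_cases hP : P x = true <;> simp [hP, news, hx]
      rw [hns]
    · have hcc : PySem.Set.contains s x = false := by rw [set_contains_eq]; simp [hx]
      rw [if_neg (by rw [hcc]; exact Bool.false_ne_true)]
      by_cases hP : P x = true
      · rw [if_pos hP, set_add_eq, if_neg hx, ih (s ++ [x]) (acc ++ [x])]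
        have hns : news s ((x :: l).filter P) = x :: news (s ++ [x]) (l.filter P) := by
          simp [hP, news, hx]
        rw [hns]
        simp [List.append_assoc]
      · rw [if_neg hP, ih s acc]
        have hns : news s ((x :: l).filter P) = news s (l.filter P) := by
          simp [hP]
        rw [hns]

-- A's outer countdown, starting from a state that already holds everything with pkey > m
theorem outerA_eq (e : List Char) (elements : List String) (m : Nat)
    (hm : m ≤ max 1 e.length) (s : List String)
    (hs : ∀ o, o ∈ s ↔ o ∈ news [] elements ∧ m < pkey e o) :
    ((PySem.List.pyRange (m : Int) 0 (-1)).foldl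
      (fun (st : PySem.Set String × List String) i =>
        let pfx := PySem.List.slice e none (some i)
        elements.foldl
          (fun (st : PySem.Set String × List String) other =>
            if PySem.Set.contains st.1 other then st
            else if PySem.Chars.startswith other.toList pfx then
              (PySem.Set.add st.1 other, st.2 ++ [other])
            else st) st) (s, s))
    = (s ++ (PySem.List.pyRange (m : Int) 0 (-1)).flatMap
          (fun i => (news [] elements).filter (fun o => pkey e o == i.toNat)),
       s ++ (PySem.List.pyRange (m : Int) 0 (-1)).flatMap
          (fun i => (news [] elements).filter (fun o => pkey e o == i.toNat))) := by
  induction m generalizing s with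
  | zero =>
    rw [PySem.List.pyRange_neg_one_eq_nil (by omega)]
    simp
  | succ m ih =>
    rw [PySem.List.pyRange_neg_one_cons (by push_cast; omega)]
    have hcast : ((m + 1 : Nat) : Int) - 1 = (m : Int) := by push_cast; ring
    rw [hcast]
    simp only [List.foldl_cons, List.flatMap_cons]
    rw [innerA_eq]
    have htn : ((m + 1 : Nat) : Int).toNat = m + 1 := by omega
    have hchunk :
        news s (elements.filter
          (fun o => PySem.Chars.startswith o.toList
            (PySem.List.slice e none (some ((m + 1 : Nat) : Int)))))
        = (news [] elements).filter (fun o => pkey e o == ((m + 1 : Nat) : Int).toNat) := by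
      rw [news_filter, news_sub elements s [] (by simp), List.filter_filter]
      refine List.filter_congr ?_
      intro o ho
      rw [startswith_slice_eq_pkey e o ((m + 1 : Nat) : Int) (by push_cast; omega)
        (by exact_mod_cast hm), htn]
      have hos : o ∈ s ↔ m + 1 < pkey e o := by rw [hs]; tauto
      by_cases hk : m + 1 ≤ pkey e o
      · by_cases heq : pkey e o = m + 1
        · have h1 : o ∉ s := by rw [hos]; omega
          simp [h1, heq]
        · have h1 : o ∈ s := hos.mpr (by omega)
          simp [hk, h1, heq]
      · have h1 : o ∉ s := by rw [hos]; omega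
        simp [hk, h1]
        omega
    rw [hchunk]
    have hmem : ∀ o, o ∈ s ++ (news [] elements).filter
          (fun o => pkey e o == ((m + 1 : Nat) : Int).toNat)
        ↔ o ∈ news [] elements ∧ m < pkey e o := by
      intro o
      rw [htn]
      simp only [List.mem_append, List.mem_filter, hs, beq_iff_eq]
      constructor
      · rintro (⟨h1, h2⟩ | ⟨h1, h2⟩)
        · exact ⟨h1, by omega⟩
        · exact ⟨h1, by omega⟩
      · rintro ⟨h1, h2⟩
        by_cases hgt : m + 1 < pkey e o
        · exact Or.inl ⟨h1, hgt⟩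
        · exact Or.inr ⟨h1, by omega⟩
    rw [ih (by omega) _ hmem]
    simp [List.append_assoc]

-- B's bucket-filling pass: bucket j collects, in order, the new elements with pkey = j
theorem bucketsB_eq (e : List Char) (l : List String) (s : List String)
    (bk : List (List String)) (hlen : bk.length = max 1 e.length + 1) :
    ∀ j, 1 ≤ j → j ≤ max 1 e.length →
    ((l.foldl
      (fun (st : PySem.Set String × List (List String)) other =>
        if PySem.Set.contains st.1 other then st
        else
          let seen := PySem.Set.add st.1 other
          let p := commonLen e other.toList
          if e.isEmpty then (seen, st.2.set 1 (st.2.getD 1 [] ++ [other]))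
          else if p ≠ 0 then (seen, st.2.set p (st.2.getD p [] ++ [other]))
          else (seen, st.2)) (s, bk)).2).getD j []
    = bk.getD j [] ++ (news s l).filter (fun o => pkey e o == j) := by
  induction l generalizing s bk with
  | nil => intro j _ _; simp [news]
  | cons x l ih =>
    intro j hj1 hjL
    rw [List.foldl_cons]
    show ((List.foldl _
      (if PySem.Set.contains s x then (s, bk)
       else if e.isEmpty then (PySem.Set.add s x, bk.set 1 (bk.getD 1 [] ++ [x]))
       else if commonLen e x.toList ≠ 0 then
         (PySem.Set.add s x, bk.set (commonLen e x.toList) (bk.getD (commonLen e x.toList) [] ++ [x]))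
       else (PySem.Set.add s x, bk)) l).2).getD j [] = _
    by_cases hx : x ∈ s
    · have hcc : PySem.Set.contains s x = true := by rw [set_contains_eq]; simp [hx]
      rw [if_pos hcc, ih s bk hlen j hj1 hjL]
      simp [news, hx]
    · have hcc : PySem.Set.contains s x = false := by rw [set_contains_eq]; simp [hx]
      rw [if_neg (by rw [hcc]; exact Bool.false_ne_true), set_add_eq, if_neg hx]
      have hnews : news s (x :: l) = x :: news (s ++ [x]) l := by simp [news, hx]
      rcases Bool.eq_false_or_eq_true e.isEmpty with he | he
      · -- e empty
        rw [if_pos he]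
        have hpk : pkey e x = 1 := by unfold pkey; rw [he]; simp
        have hLe : max 1 e.length = 1 := by
          rcases e with _ | _
          · simp
          · simp at he
        have hj : j = 1 := by omega
        subst hj
        rw [ih (s ++ [x]) _ (by simpa using hlen) 1 (by omega) (by omega)]
        rw [List.getD_eq_getElem?_getD, List.getElem?_set_self (by rw [hlen]; omega), hnews]
        simp only [List.filter_cons, hpk, beq_self_eq_true, if_true]
        simp [List.getD_eq_getElem?_getD, List.append_assoc]
      · -- e nonempty
        rw [if_neg (by rw [he]; exact Bool.false_ne_true)]
        have hpk : pkey e x = commonLen e x.toList := by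
          unfold pkey; rw [he]; simp
        by_cases hp : commonLen e x.toList ≠ 0
        · rw [if_pos hp, ih (s ++ [x]) _ (by simpa using hlen) j hj1 hjL]
          have hplen : commonLen e x.toList < bk.length := by
            have := commonLen_le e x.toList
            rw [hlen]; omega
          by_cases hjp : j = commonLen e x.toList
          · subst hjp
            rw [List.getD_eq_getElem?_getD, List.getElem?_set_self (by omega), hnews]
            simp only [List.filter_cons, hpk, beq_self_eq_true, if_true]
            simp [List.getD_eq_getElem?_getD, List.append_assoc]
          · rw [List.getD_eq_getElem?_getD, List.getElem?_set_ne (by omega), hnews]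
            simp only [List.filter_cons, hpk]
            rw [if_neg (by simp only [beq_iff_eq]; exact fun h => hjp h.symm)]
            simp [List.getD_eq_getElem?_getD]
        · rw [if_neg hp, ih (s ++ [x]) bk hlen j hj1 hjL, hnews]
          simp only [List.filter_cons, hpk]
          rw [if_neg (by simp only [beq_iff_eq]; omega)]

theorem flatMap_congr_mem (l : List Int) (f g : Int → List String)
    (h : ∀ x ∈ l, f x = g x) : l.flatMap f = l.flatMap g := by
  induction l with
  | nil => simp
  | cons x l ih =>
    simp only [List.flatMap_cons]
    rw [h x List.mem_cons_self, ih (fun y hy => h y (List.mem_cons_of_mem _ hy))]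

-- ===== VERDICT (by name: the statement is the Claim_ definition above) =====
theorem find_prefix_matches_spec : Claim_equal_find_prefix_matches := by
  intro element elements _ _
  unfold Spec_find_prefix_matches find_prefix_matches find_prefix_matches_alt
  simp only []
  set e := element.toList with he
  set L : Nat := max 1 e.length with hL
  have hempty : (PySem.Set.empty : PySem.Set String) = ([] : List String) := rfl
  have hlen : max 1 (PySem.Str.len element) = (L : Int) := by
    simp [pysem, hL, he]
  rw [hlen, hempty]
  rw [outerA_eq e elements L (by omega) []
    (by intro o; simp only [List.not_mem_nil, false_iff]
        rintro ⟨_, hgt⟩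
        exact absurd hgt (by have := pkey_le e o; omega))]
  dsimp only
  rw [PySem.List.foldl_append_eq_flatMap]
  simp only [List.nil_append]
  refine flatMap_congr_mem _ _ _ ?_
  intro i hi
  rw [PySem.List.mem_pyRange_neg_one] at hi
  have h1 : 1 ≤ i.toNat := by omega
  have h2 : i.toNat ≤ L := by omega
  rw [bucketsB_eq e elements [] (List.replicate (L + 1) []) (by simp [hL]) i.toNat h1 h2]
  rw [List.getD_eq_getElem?_getD, List.getElem?_replicate]
  simp only [if_pos (by omega : i.toNat < L + 1)]
  simp
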